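-- pv_equiv track=rewrite | github.com/pypi-data/pypi-mirror-383 | packages/dlabx/dlabx-0.1.0-py3-none-any.whl/dlabx/greedy/Job_Scheduling_Min_Lateness.py | Job_Scheduling_Min_Lateness
-- ===== SOURCE A (Python) =====
-- def Job_Scheduling_Min_Lateness(jobs):
--
--     sorted_jobs = sorted(jobs, key=lambda x: x[2])  # x[2] = deadline
--     current_time = 0
--     max_lateness = 0
--     schedule = []
--
--     for job_id, p_time, deadline in sorted_jobs:
--         current_time += p_time
--         lateness = max(0, current_time - deadline)
--         max_lateness = max(max_lateness, lateness)
--         schedule.append(job_id)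
--
--     return schedule, max_lateness
-- ===== SOURCE B (Python) =====
-- def Job_Scheduling_Min_Lateness(jobs):
--     sorted_jobs = sorted(jobs, key=lambda x: x[2])
--     schedule = [job[0] for job in sorted_jobs]
--     p_times = [job[1] for job in sorted_jobs]
--     completions = [sum(p_times[:i + 1]) for i in range(len(sorted_jobs))]
--     latenesses = [c - job[2] for c, job in zip(completions, sorted_jobs)]
--     return schedule, max([0] + latenesses)
-- ===== Notes on version B (the rewrite author's own statement) =====
-- stated objective: alternative
-- what changed: Replaces A's single fused accumulator loop by separate passes: comprehensions for the schedule, a prefix-sum completion table built from slices, a zipped lateness list, and one final max reduction over [0]+latenesses.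
import Mathlib
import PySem

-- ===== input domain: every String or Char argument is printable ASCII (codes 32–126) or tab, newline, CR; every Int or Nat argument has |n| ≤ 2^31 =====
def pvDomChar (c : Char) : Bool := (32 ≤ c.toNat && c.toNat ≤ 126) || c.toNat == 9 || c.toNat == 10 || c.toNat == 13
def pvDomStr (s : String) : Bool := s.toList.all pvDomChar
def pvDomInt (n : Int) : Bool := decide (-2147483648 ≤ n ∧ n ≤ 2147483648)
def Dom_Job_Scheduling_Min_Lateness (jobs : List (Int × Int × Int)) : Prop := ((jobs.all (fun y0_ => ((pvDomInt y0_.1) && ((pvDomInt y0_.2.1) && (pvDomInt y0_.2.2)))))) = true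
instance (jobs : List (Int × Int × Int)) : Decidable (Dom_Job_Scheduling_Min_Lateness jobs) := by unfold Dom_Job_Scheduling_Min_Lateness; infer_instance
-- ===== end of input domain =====

-- B replaces A's single fused accumulator loop by separate passes (schedule comprehension,
-- prefix-sum completion table, zipped lateness list, one final max reduction); objective: alternative.

-- ===== PORT A =====
def Job_Scheduling_Min_Lateness (jobs : List (Int × Int × Int)) : List Int × Int :=
  let sorted_jobs := PySem.List.sorted jobs (fun x => x.2.2) false
  let st := sorted_jobs.foldl
    (fun (st : Int × Int × List Int) job =>
      let current_time := st.1 + job.2.1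
      let lateness := max 0 (current_time - job.2.2)
      (current_time, max st.2.1 lateness, st.2.2 ++ [job.1]))
    ((0 : Int), (0 : Int), ([] : List Int))
  (st.2.2, st.2.1)

-- ===== PORT B =====
def Job_Scheduling_Min_Lateness_alt (jobs : List (Int × Int × Int)) : List Int × Int :=
  let sorted_jobs := PySem.List.sorted jobs (fun x => x.2.2) false
  let schedule := sorted_jobs.map (fun job => job.1)
  let p_times := sorted_jobs.map (fun job => job.2.1)
  let completions := (PySem.List.pyRange 0 sorted_jobs.length 1).map
    (fun i => (PySem.List.slice p_times none (some (i + 1))).sum)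
  let latenesses := (completions.zip sorted_jobs).map (fun cj => cj.1 - cj.2.2.2)
  (schedule, (PySem.List.max? ((0 : Int) :: latenesses) (fun x => x)).getD 0)

-- ===== PRECONDITION & SPEC =====
def Spec_Job_Scheduling_Min_Lateness (jobs : List (Int × Int × Int)) (out : List Int × Int) : Prop := out = Job_Scheduling_Min_Lateness_alt jobs
instance (jobs : List (Int × Int × Int)) (out : List Int × Int) : Decidable (Spec_Job_Scheduling_Min_Lateness jobs out) := by unfold Spec_Job_Scheduling_Min_Lateness; infer_instance

-- ===== CLAIM (what is proved, stated in full; the proofs are below) =====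
def Claim_equal_Job_Scheduling_Min_Lateness : Prop := ∀ (jobs : List (Int × Int × Int)), Dom_Job_Scheduling_Min_Lateness jobs → Spec_Job_Scheduling_Min_Lateness jobs (Job_Scheduling_Min_Lateness jobs)

-- ===== LEMMAS AND PROOFS =====

/-- Reference lateness list: for each job of `l` (already sorted), completion time minus deadline,
    starting from elapsed time `ct`. -/
def pvLats : List (Int × Int × Int) → Int → List Int
  | [], _ => []
  | j :: t, ct => (ct + j.2.1 - j.2.2) :: pvLats t (ct + j.2.1)

/-- Characterisation of A's fold. -/
theorem pvFoldA_char (l : List (Int × Int × Int)) (ct ml : Int) (sch : List Int) :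
    l.foldl
      (fun (st : Int × Int × List Int) job =>
        let current_time := st.1 + job.2.1
        let lateness := max 0 (current_time - job.2.2)
        (current_time, max st.2.1 lateness, st.2.2 ++ [job.1]))
      (ct, ml, sch)
    = (ct + (l.map (fun j => j.2.1)).sum,
       (pvLats l ct).foldl (fun a x => max a (max 0 x)) ml,
       sch ++ l.map (fun j => j.1)) := by
  induction l generalizing ct ml sch with
  | nil => simp [pvLats]
  | cons j t ih =>
    simp only [List.foldl_cons, List.map_cons, List.sum_cons, pvLats, ih]
    refine Prod.ext ?_ (Prod.ext ?_ ?_) <;> simp <;> try ring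

/-- Clamping each element to ≥ 0 inside the max-fold is the same as a plain max-fold,
    as long as the accumulator is nonnegative. -/
theorem pvFold_clamp (ls : List Int) (m : Int) (hm : 0 ≤ m) :
    ls.foldl (fun a x => max a (max 0 x)) m = ls.foldl max m := by
  induction ls generalizing m with
  | nil => rfl
  | cons x t ih =>
    simp only [List.foldl_cons]
    have h1 : max m (max 0 x) = max m x := by
      rw [max_comm 0 x, ← max_assoc, max_eq_left (le_trans hm (le_max_left m x))]
    rw [h1, ih (max m x) (le_trans hm (le_max_left m x))]

/-- `max?` with identity key on a nonempty list is a max-fold. -/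
theorem pvMaxq_foldl (ls : List Int) (a : Int) :
    PySem.List.max? (a :: ls) (fun x => x) = some (ls.foldl max a) := by
  induction ls generalizing a with
  | nil => rfl
  | cons x t ih =>
    have step : PySem.List.max? (a :: x :: t) (fun x => x)
        = PySem.List.max? (max a x :: t) (fun x => x) := by
      unfold PySem.List.max?
      simp only [List.foldl_cons]
      congr 1
      by_cases h : a < x
      · simp [h, max_eq_right h.le]
      · simp [h, max_eq_left (not_lt.mp h)]
    rw [step, ih, List.foldl_cons]

/-- B's zipped lateness list is the reference lateness list. -/
theorem pvLatsB_char (l : List (Int × Int × Int)) (ct : Int) :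
    (((PySem.List.pyRange 0 l.length 1).map
        (fun i => ct + (PySem.List.slice (l.map (fun j => j.2.1)) none (some (i + 1))).sum)).zip l).map
      (fun cj => cj.1 - cj.2.2.2)
    = pvLats l ct := by
  induction l generalizing ct with
  | nil => simp [pvLats]
  | cons j t ih =>
    have hr : PySem.List.pyRange 0 ((j :: t).length : Int) 1
        = (0 : Int) :: (PySem.List.pyRange 0 (t.length : Int) 1).map (fun k => k + 1) := by
      rw [PySem.List.pyRange_one_cons (by exact_mod_cast Nat.succ_pos t.length)]
      congr 1
      rw [PySem.List.pyRange_one, PySem.List.pyRange_one]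
      simp only [List.map_map, List.length_cons]
      have hlen : ((((t.length + 1 : Nat)) : Int) - (0 + 1)).toNat = ((t.length : Int) - 0).toNat := by
        omega
      rw [hlen]
      apply List.map_congr_left
      intro k _
      simp [Function.comp]
      ring
    rw [hr]
    simp only [List.map_cons, List.map_map, List.zip_cons_cons, pvLats]
    congr 1
    · have h1 : PySem.List.slice (j.2.1 :: t.map (fun j => j.2.1)) none (some ((0 : Int) + 1)) = [j.2.1] := by
        rw [show ((0 : Int) + 1) = ((1 : Nat) : Int) by norm_num, PySem.List.slice_to_natCast]
        simp
      rw [h1]; simp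
    · rw [← ih (ct + j.2.1)]
      congr 1
      congr 1
      apply List.map_congr_left
      intro k hk
      have hk0 : 0 ≤ k := by
        rw [PySem.List.mem_pyRange_one] at hk; omega
      obtain ⟨n, rfl⟩ : ∃ n : Nat, k = (n : Int) := ⟨k.toNat, by omega⟩
      simp only [Function.comp]
      have h2 : ((n : Int) + 1 + 1) = (((n + 2 : Nat) : Int)) := by push_cast; ring
      have h3 : ((n : Int) + 1) = (((n + 1 : Nat) : Int)) := by push_cast; ring
      rw [h2, h3, PySem.List.slice_to_natCast, PySem.List.slice_to_natCast]
      simp [List.take_succ_cons]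
      ring

-- ===== VERDICT (by name: the statement is the Claim_ definition above) =====
theorem Job_Scheduling_Min_Lateness_spec : Claim_equal_Job_Scheduling_Min_Lateness := by
  intro jobs _
  unfold Spec_Job_Scheduling_Min_Lateness Job_Scheduling_Min_Lateness Job_Scheduling_Min_Lateness_alt
  simp only []
  set sj := PySem.List.sorted jobs (fun x => x.2.2) false with hsj
  rw [pvFoldA_char]
  have hlats := pvLatsB_char sj 0
  simp only [zero_add] at hlats
  refine Prod.ext ?_ ?_
  · simp
  · simp only []
    rw [pvFold_clamp _ 0 le_rfl, hlats, pvMaxq_foldl]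
    rfl
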